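-- pv_equiv track=rewrite | github.com/gadeuneo/MathofCS | PS 8/Credit Card Number Guesser.py | odd
-- ===== SOURCE A (Python) =====
-- def odd(x):
-- 	total = 0
-- 	x=x[::2]
-- 	for i in range(len(x)):
-- 		if ((x[i])*2) > 9:
-- 			st=str(x[i]*2)
-- 			t=map(int,st)
-- 			total += sum(t)
-- 		else:
-- 			total += x[i]*2
-- 	return total
-- ===== SOURCE B (Python) =====
-- # Branch-free, two-stage computation: first total = 2*sum of every-other element,
-- # then subtract the carry corrections 9*(d//10^k), using the identity
-- # digitsum(n) = n - 9*sum_{k>=1} n//10^k (valid for n > 0; for d <= 9 the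
-- # correction loop never runs, so adding d directly is automatic).
--
-- def odd(x):
--     evens = x[::2]
--     total = 2 * sum(evens)
--     for v in evens:
--         d = 2 * v
--         p = 10
--         while p <= d:
--             total -= 9 * (d // p)
--             p *= 10
--     return total
-- ===== Notes on version B (the rewrite author's own statement) =====
-- stated objective: alternative
-- what changed: B never extracts digits: it first adds 2*sum of the every-other elements in one go, then subtracts the carry corrections 9*(d//10^k) via the identity digitsum(n) = n - 9*sum(n//10^k), replacing A's branch plus str/map(int,...) digit extraction.
import Mathlib
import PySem

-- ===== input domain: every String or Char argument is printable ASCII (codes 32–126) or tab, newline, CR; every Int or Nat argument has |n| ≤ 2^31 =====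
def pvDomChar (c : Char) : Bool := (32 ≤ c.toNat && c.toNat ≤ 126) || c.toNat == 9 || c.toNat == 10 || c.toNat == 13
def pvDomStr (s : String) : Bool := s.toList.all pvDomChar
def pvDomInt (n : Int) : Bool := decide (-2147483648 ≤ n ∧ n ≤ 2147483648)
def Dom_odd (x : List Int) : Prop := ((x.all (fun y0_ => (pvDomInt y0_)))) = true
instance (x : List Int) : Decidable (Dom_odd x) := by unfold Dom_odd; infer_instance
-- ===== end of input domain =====

-- B is branch-free and extracts no digits: it adds 2*sum of the every-other elements in one
-- pass, then subtracts the carry corrections 9*(d//10^k) (identity digitsum(n) = n - 9*Σ n//10^k);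
-- objective: alternative.

-- ===== PORT A =====
-- sum(map(int, str(n))): each decimal digit char to its int value; exact here because the
-- branch guarantees n > 9, so str(n) consists of digit characters only.
def strDigitSum (n : Int) : Int :=
  ((PySem.Int.toChars n).map (fun c => (c.toNat : Int) - 48)).sum

-- loop body of A: total += sum(map(int, str(x[i]*2))) if x[i]*2 > 9 else x[i]*2
def aStep (total v : Int) : Int :=
  if v * 2 > 9 then total + strDigitSum (v * 2) else total + v * 2

def odd (x : List Int) : Int :=
  let xs := (PySem.List.slice? x none none 2).getD []  -- x = x[::2] (step 2 ≠ 0: never none)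
  (PySem.List.pyRange 0 (xs.length : Int) 1).foldl     -- for i in range(len(x))
    (fun total i => aStep total (PySem.List.pyGetD xs i 0)) 0

-- ===== PORT B =====
-- while p <= d: total -= 9 * (d // p); p *= 10   (the 0 < p conjunct only makes the
-- recursion total; B always enters with p = 10)
def whileP (total d p : Int) : Int :=
  if h : 0 < p ∧ p ≤ d then
    whileP (total - 9 * PySem.Int.floordiv d p) d (p * 10)
  else total
termination_by (d + 1 - p).toNat
decreasing_by omega

def odd_alt (x : List Int) : Int :=
  let evens := (PySem.List.slice? x none none 2).getD []   -- evens = x[::2]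
  evens.foldl (fun total v => whileP total (2 * v) 10)     -- for v in evens: d = 2*v; p = 10; while …
    (2 * evens.sum)                                        -- total = 2 * sum(evens)

-- ===== PRECONDITION & SPEC =====
def Spec_odd (x : List Int) (out : Int) : Prop := out = odd_alt x
instance (x : List Int) (out : Int) : Decidable (Spec_odd x out) := by unfold Spec_odd; infer_instance

-- ===== CLAIM (what is proved, stated in full; the proofs are below) =====
def Claim_equal_odd : Prop := ∀ (x : List Int), Dom_odd x → Spec_odd x (odd x)

-- ===== LEMMAS AND PROOFS =====

-- every-other element, x[::2]
def eo (x : List Int) : List Int :=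
  match x with
  | [] => []
  | a :: rest => a :: eo rest.tail
termination_by x.length
decreasing_by simp

-- digit sum via Python's d % 10 / d // 10 (proof intermediate)
def pyDigitSum (n : Int) : Int :=
  if _h : 0 < n then
    PySem.Int.mod n 10 + pyDigitSum (PySem.Int.floordiv n 10)
  else 0
termination_by n.toNat
decreasing_by
  rw [PySem.Int.floordiv_eq_ediv_of_pos (by omega)]
  omega

-- digit sum of a natural number
def ndsum (n : Nat) : Int :=
  if n = 0 then 0 else ((n % 10 : Nat) : Int) + ndsum (n / 10)

def csum (cs : List Char) : Int := (cs.map (fun c => (c.toNat : Int) - 48)).sum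

lemma digitChar_val (d : Nat) (h : d < 10) :
    ((Nat.digitChar d).toNat : Int) - 48 = (d : Int) := by
  interval_cases d <;> decide

lemma toDigitsCore_sum :
    ∀ (f n : Nat) (acc : List Char), n < f →
      csum (Nat.toDigitsCore 10 f n acc) = ndsum n + csum acc := by
  intro f
  induction f with
  | zero => intro n acc h; omega
  | succ f ih =>
    intro n acc h
    rw [Nat.toDigitsCore]
    have hc : csum (Nat.digitChar (n % 10) :: acc) = ((n % 10 : Nat) : Int) + csum acc := by
      simp [csum, digitChar_val (n % 10) (by omega)]
    by_cases h10 : n / 10 = 0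
    · rw [if_pos h10, hc]
      by_cases hn : n = 0
      · simp [hn, ndsum]
      · conv_rhs => rw [ndsum, if_neg hn, h10, ndsum]
        simp
    · rw [if_neg h10, ih (n / 10) _ (by omega), hc]
      conv_rhs => rw [ndsum, if_neg (by omega : ¬ n = 0)]
      ring

lemma pyDigitSum_eq_ndsum : ∀ (m : Nat), pyDigitSum (m : Int) = ndsum m := by
  intro m
  induction m using Nat.strong_induction_on with
  | _ m ih =>
    rw [pyDigitSum, ndsum]
    by_cases hm : m = 0
    · simp [hm]
    · have h1 : PySem.Int.mod (m : Int) 10 = ((m % 10 : Nat) : Int) := by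
        exact_mod_cast PySem.Int.mod_natCast m 10
      have h2 : PySem.Int.floordiv (m : Int) 10 = ((m / 10 : Nat) : Int) := by
        exact_mod_cast PySem.Int.floordiv_natCast m 10
      rw [dif_pos (by exact_mod_cast Nat.pos_of_ne_zero hm), if_neg hm, h1, h2,
        ih (m / 10) (by omega)]

lemma strDigitSum_eq_pyDigitSum (n : Int) (h : 0 < n) :
    strDigitSum n = pyDigitSum n := by
  have hn : n = (n.toNat : Int) := by omega
  rw [hn, pyDigitSum_eq_ndsum]
  show csum (PySem.Int.toChars (n.toNat : Int)) = ndsum n.toNat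
  rw [PySem.Int.toChars, if_neg (by omega)]
  have : ((n.toNat : Int)).toNat = n.toNat := by omega
  rw [this, Nat.toDigits, toDigitsCore_sum (n.toNat + 1) n.toNat [] (by omega)]
  simp [csum]

-- x[::2] as a filterMap over indices, matched against eo
lemma filterMap_eo :
    ∀ (n : Nat) (x : List Int), x.length ≤ n →
      (List.range ((x.length + 1) / 2)).filterMap (fun k => x[2 * k]?) = eo x := by
  intro n
  induction n with
  | zero =>
    intro x h
    have : x = [] := by cases x <;> simp_all
    subst this; simp [eo]
  | succ n ih =>
    intro x h
    match x with
    | [] => simp [eo]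
    | [a] => simp [eo, List.range_succ]
    | a :: b :: rs =>
      have hlen : (a :: b :: rs).length = rs.length + 2 := by simp
      have hcount : ((a :: b :: rs).length + 1) / 2 = (rs.length + 1) / 2 + 1 := by
        rw [hlen]; omega
      rw [hcount, List.range_succ_eq_map, List.filterMap_cons]
      simp only [List.filterMap_map]
      have hshift : ∀ k : Nat, (a :: b :: rs)[2 * (k + 1)]? = rs[2 * k]? := by
        intro k
        have : 2 * (k + 1) = 2 * k + 1 + 1 := by ring
        rw [this, List.getElem?_cons_succ, List.getElem?_cons_succ]
      have : (List.range ((rs.length + 1) / 2)).filterMap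
          ((fun k => (a :: b :: rs)[2 * k]?) ∘ (fun k => k + 1)) =
          (List.range ((rs.length + 1) / 2)).filterMap (fun k => rs[2 * k]?) := by
        apply List.filterMap_congr
        intro k _
        simp only [Function.comp]
        exact hshift k
      rw [this, ih rs (by simp at h; omega)]
      simp [eo]

lemma slice_two_eq_eo (x : List Int) :
    PySem.List.slice? x none none 2 = some (eo x) := by
  rw [PySem.List.slice?]
  rw [if_neg (by norm_num)]
  rw [PySem.List.sliceIndices]
  simp only [show ¬((2:Int) < 0) by norm_num, if_false]
  congr 1
  rw [if_pos (show (0:Int) < 2 by norm_num)]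
  by_cases hx : x.length = 0
  · rw [if_neg (by omega)]
    have : x = [] := List.eq_nil_of_length_eq_zero hx
    subst this
    simp [eo]
  · rw [if_pos (by omega)]
    have hcount : (((x.length : Int) - 0 + 2 - 1) / 2).toNat = (x.length + 1) / 2 := by omega
    rw [hcount]
    refine Eq.trans (List.filterMap_congr ?_) (filterMap_eo x.length x le_rfl)
    intro k _
    congr 1
    omega

-- A's loop body as a per-element contribution
def gB (v : Int) : Int := if 2 * v > 9 then pyDigitSum (2 * v) else 2 * v

lemma aStep_eq (t v : Int) : aStep t v = t + gB v := by
  unfold aStep gB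
  have h2 : v * 2 = 2 * v := by ring
  rw [h2]
  split_ifs with h
  · rw [strDigitSum_eq_pyDigitSum (2 * v) (by omega)]
  · rfl

lemma odd_eq_sum (x : List Int) : odd x = ((eo x).map gB).sum := by
  unfold odd
  rw [slice_two_eq_eo]
  show (PySem.List.pyRange 0 ((eo x).length : Int) 1).foldl
    (fun total i => aStep total (PySem.List.pyGetD (eo x) i 0)) 0 = ((eo x).map gB).sum
  rw [PySem.List.foldl_pyRange_zero_pyGetD' (eo x) 0 aStep 0]
  have : ∀ (l : List Int) (init : Int), l.foldl aStep init = init + (l.map gB).sum := by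
    intro l
    induction l with
    | nil => simp
    | cons a l ihl => intro init; simp [List.foldl_cons, aStep_eq, ihl]; ring
  rw [this]; ring

-- B-side: while-loop shift — dividing d by 10 instead of multiplying p by 10
lemma whileP_shift :
    ∀ (N : Nat) (t d p : Int), 0 < p → (PySem.Int.floordiv d 10 + 1 - p).toNat ≤ N →
      whileP t d (10 * p) = whileP t (PySem.Int.floordiv d 10) p := by
  intro N
  induction N with
  | zero =>
    intro t d p hp hN
    have hq : PySem.Int.floordiv d 10 = d / 10 := PySem.Int.floordiv_eq_ediv_of_pos (by omega)
    have hiff : 10 * p ≤ d ↔ p ≤ PySem.Int.floordiv d 10 := by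
      rw [hq, Int.le_ediv_iff_mul_le (by omega)]; omega
    conv_lhs => rw [whileP]
    rw [dif_neg (by rw [hq] at hiff hN; omega)]
    conv_rhs => rw [whileP]
    rw [dif_neg (by rw [hq] at hN; omega)]
  | succ N ih =>
    intro t d p hp hN
    have hq : PySem.Int.floordiv d 10 = d / 10 := PySem.Int.floordiv_eq_ediv_of_pos (by omega)
    have hiff : 10 * p ≤ d ↔ p ≤ PySem.Int.floordiv d 10 := by
      rw [hq, Int.le_ediv_iff_mul_le (by omega)]; omega
    by_cases hc : p ≤ PySem.Int.floordiv d 10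
    · conv_lhs => rw [whileP]
      rw [dif_pos ⟨by omega, hiff.mpr hc⟩]
      have hdd : PySem.Int.floordiv d (10 * p) = PySem.Int.floordiv (PySem.Int.floordiv d 10) p := by
        rw [hq, PySem.Int.floordiv_eq_ediv_of_pos (by omega : (0:Int) < 10 * p),
          PySem.Int.floordiv_eq_ediv_of_pos hp, Int.ediv_ediv_of_nonneg (by omega : (0:Int) ≤ 10)]
      have harr : 10 * p * 10 = 10 * (p * 10) := by ring
      rw [hdd, harr, ih _ d (p * 10) (by omega) (by rw [hq] at hN ⊢; omega)]
      conv_rhs => rw [whileP]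
      rw [dif_pos ⟨hp, hc⟩]
    · conv_lhs => rw [whileP]
      rw [dif_neg (by omega)]
      conv_rhs => rw [whileP]
      rw [dif_neg (by omega)]

lemma whileP_ten (t d : Int) (h : 10 ≤ d) :
    whileP t d 10 = whileP (t - 9 * PySem.Int.floordiv d 10) (PySem.Int.floordiv d 10) 10 := by
  rw [whileP, dif_pos ⟨by omega, h⟩]
  exact whileP_shift (PySem.Int.floordiv d 10 + 1 - 10).toNat _ d 10 (by omega) le_rfl

lemma whileP_main : ∀ (m : Nat) (d t : Int), 0 < d → d.toNat ≤ m →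
    whileP t d 10 = t - d + pyDigitSum d := by
  intro m
  induction m with
  | zero => intro d t hd hm; omega
  | succ m ih =>
    intro d t hd hm
    have hq : PySem.Int.floordiv d 10 = d / 10 := PySem.Int.floordiv_eq_ediv_of_pos (by omega)
    have hmod : PySem.Int.mod d 10 = d % 10 := PySem.Int.mod_eq_emod_of_pos (by omega)
    by_cases h10 : 10 ≤ d
    · have hqpos : 0 < d / 10 := by omega
      rw [whileP_ten t d h10, ih (PySem.Int.floordiv d 10) _ (by omega) (by rw [hq]; omega)]
      conv_rhs => rw [pyDigitSum, dif_pos hd]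
      rw [hq, hmod]
      omega
    · rw [whileP, dif_neg (by omega)]
      conv_rhs => rw [pyDigitSum, dif_pos hd]
      have hq0 : d / 10 = 0 := by omega
      rw [hq, hmod, hq0]
      rw [show pyDigitSum 0 = 0 by rw [pyDigitSum]; simp]
      omega

lemma whileP_gB (t v : Int) : whileP t (2 * v) 10 = t + (gB v - 2 * v) := by
  unfold gB
  by_cases h : 2 * v > 9
  · rw [whileP_main (2 * v).toNat (2 * v) t (by omega) le_rfl, if_pos h]; ring
  · rw [whileP, dif_neg (by omega), if_neg h]; ring

lemma odd_alt_eq_sum (x : List Int) : odd_alt x = ((eo x).map gB).sum := by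
  unfold odd_alt
  rw [slice_two_eq_eo]
  show (eo x).foldl (fun total v => whileP total (2 * v) 10) (2 * (eo x).sum)
      = ((eo x).map gB).sum
  have hbody : (fun (total v : Int) => whileP total (2 * v) 10)
      = fun total v => total + (gB v - 2 * v) := by
    funext t v; exact whileP_gB t v
  rw [hbody, PySem.List.foldl_add]
  have hsplit : ((eo x).map (fun v => gB v - 2 * v)).sum
      = ((eo x).map gB).sum - 2 * (eo x).sum := by
    induction eo x with
    | nil => simp
    | cons a l ihl => simp [ihl]; ring
  rw [hsplit]; ring

-- ===== VERDICT (by name: the statement is the Claim_ definition above) =====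
theorem odd_spec : Claim_equal_odd := by
  intro x _
  unfold Spec_odd
  rw [odd_eq_sum, odd_alt_eq_sum]
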